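-- pv_equiv track=rewrite | github.com/Henkemannn/YuplanUnified | core/components/recipe_service.py | _normalize_trait_signals
-- ===== SOURCE A (Python) =====
-- _KNOWN_TRAIT_SIGNALS = {"lactose", "gluten", "fish", "egg", "nuts"}
--
-- def _normalize_trait_signals(
--     trait_signals: list[str] | tuple[str, ...] | None,
-- ) -> tuple[str, ...]:
--     if trait_signals is None:
--         return ()
--
--     values: set[str] = set()
--     for raw in trait_signals:
--         value = str(raw or "").strip().lower()
--         if not value:
--             continue
--         values.add(value)
--
--     # Keep the baseline known signals first while allowing extension values.
--     known = sorted(v for v in values if v in _KNOWN_TRAIT_SIGNALS)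
--     extension = sorted(v for v in values if v not in _KNOWN_TRAIT_SIGNALS)
--     return tuple(known + extension)
-- ===== SOURCE B (Python) =====
-- _KNOWN_TRAIT_SIGNALS = {"lactose", "gluten", "fish", "egg", "nuts"}
--
-- # known signals in their (fixed) alphabetical order; no sort is ever run on them
-- _KNOWN_ORDER = ("egg", "fish", "gluten", "lactose", "nuts")
--
-- def _normalize_trait_signals(trait_signals):
--     if trait_signals is None:
--         return ()
--     # Partition while normalizing: known signals go into one set, extensions
--     # into another, in a single pass.
--     seen_known = set()
--     extensions = set()
--     for raw in trait_signals:
--         value = str(raw or "").strip().lower()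
--         if not value:
--             continue
--         if value in _KNOWN_TRAIT_SIGNALS:
--             seen_known.add(value)
--         else:
--             extensions.add(value)
--     # The known half needs no sort: scan the constant ordered table.
--     known = [s for s in _KNOWN_ORDER if s in seen_known]
--     return tuple(known + sorted(extensions))
-- ===== Notes on version B (the rewrite author's own statement) =====
-- stated objective: alternative
-- what changed: B partitions values into known/extension sets during the single normalization pass and produces the known half by scanning a constant ordered table instead of sorting it, sorting only the extension set; A builds one set and then runs two filtered sorted() passes.
import Mathlib
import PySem

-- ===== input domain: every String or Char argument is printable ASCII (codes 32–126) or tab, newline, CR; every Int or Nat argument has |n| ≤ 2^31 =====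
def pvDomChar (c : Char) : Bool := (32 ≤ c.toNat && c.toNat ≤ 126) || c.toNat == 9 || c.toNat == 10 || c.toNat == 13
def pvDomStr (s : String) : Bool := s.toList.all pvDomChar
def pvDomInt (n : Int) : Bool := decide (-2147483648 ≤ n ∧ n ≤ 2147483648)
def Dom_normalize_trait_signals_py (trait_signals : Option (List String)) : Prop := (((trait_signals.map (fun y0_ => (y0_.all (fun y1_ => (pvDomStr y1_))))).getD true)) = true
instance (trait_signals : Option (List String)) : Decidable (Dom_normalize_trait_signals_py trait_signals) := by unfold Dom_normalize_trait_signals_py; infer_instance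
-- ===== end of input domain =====

-- B partitions into known/extension sets during the normalization pass and reads the known
-- half off a constant ordered table, sorting only the extensions (objective: alternative).

-- ===== PORT A =====
def pvKnownSignals : PySem.Set String :=
  PySem.Set.ofList ["lactose", "gluten", "fish", "egg", "nuts"]

-- A's normalization loop: 'str(raw or "")' is the identity on the nonempty strings that
-- survive strip/lower, so value = raw.strip().lower()
def pvNormValues (l : List String) : PySem.Set String :=
  l.foldl (fun s raw =>
    let value := PySem.Str.lower (PySem.Str.strip raw)
    if value = "" then s else PySem.Set.add s value) PySem.Set.empty

def normalize_trait_signals_py (trait_signals : Option (List String)) : List String :=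
  match trait_signals with
  | none => []
  | some l =>
      let values := pvNormValues l
      let known := PySem.List.sorted (values.filter (fun v => pvKnownSignals.contains v)) (fun v => v)
      let extension := PySem.List.sorted (values.filter (fun v => !pvKnownSignals.contains v)) (fun v => v)
      known ++ extension

-- ===== PORT B =====
def pvKnownOrder : List String := ["egg", "fish", "gluten", "lactose", "nuts"]

-- B's single normalization pass building the two sets (seen_known, extensions)
def pvPartitionValues (l : List String) : PySem.Set String × PySem.Set String :=
  l.foldl (fun st raw =>
    let value := PySem.Str.lower (PySem.Str.strip raw)
    if value = "" then st
    else if pvKnownSignals.contains value then (PySem.Set.add st.1 value, st.2)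
    else (st.1, PySem.Set.add st.2 value)) (PySem.Set.empty, PySem.Set.empty)

def normalize_trait_signals_py_alt (trait_signals : Option (List String)) : List String :=
  match trait_signals with
  | none => []
  | some l =>
      let st := pvPartitionValues l
      let known := pvKnownOrder.filter (fun s => st.1.contains s)
      known ++ PySem.List.sorted st.2 (fun v => v)

-- ===== PRECONDITION & SPEC =====
def Spec_normalize_trait_signals_py (trait_signals : Option (List String)) (out : List String) : Prop := out = normalize_trait_signals_py_alt trait_signals
instance (trait_signals : Option (List String)) (out : List String) : Decidable (Spec_normalize_trait_signals_py trait_signals out) := by unfold Spec_normalize_trait_signals_py; infer_instance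

-- ===== CLAIM (what is proved, stated in full; the proofs are below) =====
def Claim_equal_normalize_trait_signals_py : Prop := ∀ (trait_signals : Option (List String)), Dom_normalize_trait_signals_py trait_signals → Spec_normalize_trait_signals_py trait_signals (normalize_trait_signals_py trait_signals)

-- ===== LEMMAS AND PROOFS =====

theorem filter_set_add (p : String → Bool) (s : PySem.Set String) (v : String) :
    (PySem.Set.add s v).filter p
      = if p v then PySem.Set.add (List.filter p s) v else s.filter p := by
  by_cases hv : v ∈ s <;> by_cases hp : p v = true <;>
    simp [PySem.Set.add, PySem.Set.contains, List.filter_append, hv, hp, List.mem_filter]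

-- B's single pass computes exactly the two filters of A's one set
theorem contains_iff (st : PySem.Set String) (x : String) :
    st.contains x = true ↔ x ∈ st := by
  simp [PySem.Set.contains]

-- B's single pass computes exactly the two filters of A's one set
theorem partition_eq_filters (l : List String) :
    pvPartitionValues l
      = ((pvNormValues l).filter (fun v => pvKnownSignals.contains v),
         (pvNormValues l).filter (fun v => !pvKnownSignals.contains v)) := by
  unfold pvPartitionValues pvNormValues
  suffices h : ∀ (s : PySem.Set String),
      l.foldl (fun st raw =>
        let value := PySem.Str.lower (PySem.Str.strip raw)
        if value = "" then st
        else if pvKnownSignals.contains value then (PySem.Set.add st.1 value, st.2)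
        else (st.1, PySem.Set.add st.2 value))
        (s.filter (fun v => pvKnownSignals.contains v), s.filter (fun v => !pvKnownSignals.contains v))
      = ((l.foldl (fun s raw =>
            let value := PySem.Str.lower (PySem.Str.strip raw)
            if value = "" then s else PySem.Set.add s value) s).filter (fun v => pvKnownSignals.contains v),
         (l.foldl (fun s raw =>
            let value := PySem.Str.lower (PySem.Str.strip raw)
            if value = "" then s else PySem.Set.add s value) s).filter (fun v => !pvKnownSignals.contains v)) by
    exact h PySem.Set.empty
  induction l with
  | nil => intro s; rfl
  | cons x xs ih =>
      intro s
      simp only [List.foldl_cons]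
      by_cases he : PySem.Str.lower (PySem.Str.strip x) = ""
      · simp only [if_pos he]
        exact ih s
      · by_cases hk : pvKnownSignals.contains (PySem.Str.lower (PySem.Str.strip x)) = true
        · have h1 : (PySem.Set.add s (PySem.Str.lower (PySem.Str.strip x))).filter
              (fun v => pvKnownSignals.contains v)
              = PySem.Set.add (s.filter (fun v => pvKnownSignals.contains v))
                  (PySem.Str.lower (PySem.Str.strip x)) := by
            rw [filter_set_add, if_pos hk]
          have h2 : (PySem.Set.add s (PySem.Str.lower (PySem.Str.strip x))).filter
              (fun v => !pvKnownSignals.contains v)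
              = s.filter (fun v => !pvKnownSignals.contains v) := by
            rw [filter_set_add, if_neg (by simpa using (contains_iff pvKnownSignals _).mp hk)]
          have := ih (PySem.Set.add s (PySem.Str.lower (PySem.Str.strip x)))
          rw [h1, h2] at this
          simp only [if_neg he, if_pos hk]
          exact this
        · have h1 : (PySem.Set.add s (PySem.Str.lower (PySem.Str.strip x))).filter
              (fun v => pvKnownSignals.contains v)
              = s.filter (fun v => pvKnownSignals.contains v) := by
            rw [filter_set_add, if_neg hk]
          have h2 : (PySem.Set.add s (PySem.Str.lower (PySem.Str.strip x))).filter
              (fun v => !pvKnownSignals.contains v)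
              = PySem.Set.add (s.filter (fun v => !pvKnownSignals.contains v))
                  (PySem.Str.lower (PySem.Str.strip x)) := by
            rw [filter_set_add, if_pos (by simpa using fun h => hk ((contains_iff pvKnownSignals _).mpr h))]
          have := ih (PySem.Set.add s (PySem.Str.lower (PySem.Str.strip x)))
          rw [h1, h2] at this
          simp only [if_neg he, if_neg hk]
          exact this

theorem nodup_pvNormValues (l : List String) : (pvNormValues l).Nodup := by
  unfold pvNormValues
  suffices h : ∀ (acc : PySem.Set String), acc.Nodup →
      (l.foldl (fun s raw =>
        let value := PySem.Str.lower (PySem.Str.strip raw)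
        if value = "" then s else PySem.Set.add s value) acc).Nodup from
    h _ List.nodup_nil
  induction l with
  | nil => intro acc hacc; exact hacc
  | cons x xs ih =>
      intro acc hacc
      simp only [List.foldl_cons]
      apply ih
      by_cases hv : PySem.Str.lower (PySem.Str.strip x) = ""
      · simp [hv, hacc]
      · simp only [if_neg hv]
        exact PySem.Set.nodup_add _ _ hacc

-- the fixed table lists exactly the known signals, in strictly increasing order
theorem mem_knownOrder_iff (x : String) :
    x ∈ pvKnownOrder ↔ pvKnownSignals.contains x = true := by
  have : x ∈ pvKnownOrder ↔ x ∈ pvKnownSignals := by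
    simp only [pvKnownOrder, pvKnownSignals, PySem.Set.mem_ofList]
    simp only [List.mem_cons, List.not_mem_nil, or_false]
    tauto
  rw [this, PySem.Set.contains]
  simp

theorem knownOrder_pairwise : pvKnownOrder.Pairwise (fun a b : String => a < b) := by
  have h : (fun a b : String => a < b) = fun a b : String => a.toList < b.toList :=
    funext fun a => funext fun b => propext String.lt_iff_toList_lt
  rw [h, ← List.pairwise_map (f := String.toList)]
  decide

theorem knownOrder_nodup : pvKnownOrder.Nodup := by decide

-- the table filtered by membership equals A's sorted known block
theorem known_block_eq (values : PySem.Set String) (hnd : values.Nodup) :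
    PySem.List.sorted (values.filter (fun v => pvKnownSignals.contains v)) (fun v => v)
      = pvKnownOrder.filter
          (fun s => PySem.Set.contains (values.filter (fun v => pvKnownSignals.contains v)) s) := by
  apply PySem.List.sorted_eq_of_perm_of_pairwise_lt
  · rw [List.perm_ext_iff_of_nodup (List.Nodup.filter _ knownOrder_nodup) (hnd.filter _)]
    intro a
    simp only [List.mem_filter, contains_iff, mem_knownOrder_iff]
    tauto
  · exact List.Pairwise.filter _ knownOrder_pairwise

-- ===== VERDICT (by name: the statement is the Claim_ definition above) =====
theorem normalize_trait_signals_py_spec : Claim_equal_normalize_trait_signals_py := by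
  intro ts _
  unfold Spec_normalize_trait_signals_py normalize_trait_signals_py normalize_trait_signals_py_alt
  cases ts with
  | none => rfl
  | some l =>
      simp only [partition_eq_filters]
      rw [known_block_eq (pvNormValues l) (nodup_pvNormValues l)]
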